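-- pv_equiv track=rewrite | github.com/vishal7090/md-generator | src/md_generator/image/emit.py | markdown_compare
-- ===== SOURCE A (Python) =====
-- def normalize_whitespace(text: str) -> str:
--     """Strip trailing spaces per line; collapse consecutive blank lines to one."""
--     lines = [line.rstrip() for line in text.splitlines()]
--     out: list[str] = []
--     prev_blank = False
--     for ln in lines:
--         if not ln.strip():
--             if not prev_blank:
--                 out.append("")
--             prev_blank = True
--         else:
--             prev_blank = False
--             out.append(ln)
--     return "\n".join(out).strip()
--
-- def markdown_compare(title: str, sections: list[tuple[str, dict[str, str]]]) -> str:
--     """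
--     sections: (image_filename, {engine_display_name: raw_text}).
--     """
--     parts: list[str] = [f"# {title}", ""]
--     for filename, engine_texts in sections:
--         parts.append(f"## {filename}")
--         parts.append("")
--         for engine_name, raw in engine_texts.items():
--             parts.append(f"### {engine_name}")
--             parts.append("")
--             body = normalize_whitespace(raw)
--             parts.append(body if body else "_No text extracted._")
--             parts.append("")
--     return "\n".join(parts).rstrip() + "\n"
-- ===== SOURCE B (Python) =====
-- def normalize_whitespace(text: str) -> str:
--     """Extract maximal runs of non-blank lines (paragraphs) by index scanning,
--     then rejoin them with one blank line between paragraphs."""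
--     lines = [ln.rstrip() for ln in text.splitlines()]
--     paras = []
--     i = 0
--     while i < len(lines):
--         j = i
--         while j < len(lines) and lines[j]:
--             j += 1
--         if j > i:
--             paras.append("\n".join(lines[i:j]))
--         i = j + 1
--     return "\n\n".join(paras).strip()
--
--
-- def markdown_compare(title: str, sections: list) -> str:
--     def engine_block(name: str, raw: str) -> str:
--         return f"### {name}\n\n" + (normalize_whitespace(raw) or "_No text extracted._")
--
--     blocks = [f"# {title}"] + [
--         "\n\n".join([f"## {filename}"] + [engine_block(n, r) for n, r in engine_texts.items()])
--         for filename, engine_texts in sections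
--     ]
--     return "\n\n".join(blocks).rstrip() + "\n"
-- ===== Notes on version B (the rewrite author's own statement) =====
-- stated objective: alternative
-- what changed: normalize_whitespace no longer collapses blank lines at all: it extracts maximal runs of non-blank lines (paragraphs) with an index/two-pointer scan and rejoins them with '\n\n', dropping the prev_blank flag; markdown_compare builds one fully-formed block string per heading/body joined with '\n\n' instead of A's flat parts list with interspersed empty strings joined with '\n'.
import Mathlib
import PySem

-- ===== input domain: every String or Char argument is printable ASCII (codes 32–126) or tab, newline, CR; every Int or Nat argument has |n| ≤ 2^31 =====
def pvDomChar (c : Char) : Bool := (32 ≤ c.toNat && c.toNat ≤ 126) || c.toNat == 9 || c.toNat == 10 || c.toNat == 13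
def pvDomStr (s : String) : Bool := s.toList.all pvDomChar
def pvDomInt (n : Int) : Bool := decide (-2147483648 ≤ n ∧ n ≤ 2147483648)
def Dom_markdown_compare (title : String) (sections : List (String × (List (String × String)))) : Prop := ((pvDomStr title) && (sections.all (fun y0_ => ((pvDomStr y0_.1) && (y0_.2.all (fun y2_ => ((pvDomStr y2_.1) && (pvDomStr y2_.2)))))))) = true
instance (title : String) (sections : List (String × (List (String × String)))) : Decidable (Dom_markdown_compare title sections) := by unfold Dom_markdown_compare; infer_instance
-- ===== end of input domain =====

-- B drops A's prev_blank blank-collapsing loop entirely: it extracts maximal runs of non-blank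
-- lines (paragraphs) by index scanning and rejoins them with "\n\n", and builds the document
-- from fully-formed blocks joined with "\n\n" instead of a flat parts list; same cost, different decomposition.

-- ===== PORT A =====
-- port of A's normalize_whitespace (prev_blank accumulator loop); works on List Char
def normA (text : List Char) : List Char :=
  let lines := (PySem.Chars.splitlines text).map PySem.Chars.rstrip
  let st := lines.foldl
    (fun (st : List (List Char) × Bool) ln =>
      if PySem.Chars.strip ln = [] then
        (if st.2 = false then st.1 ++ [[]] else st.1, true)
      else
        (st.1 ++ [ln], false))
    ([], false)
  PySem.Chars.strip (PySem.Chars.join ['\n'] st.1)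

def markdown_compare (title : String) (sections : List (String × (List (String × String)))) : String :=
  let parts : List (List Char) := [('#' :: ' ' :: title.toList), []]
  let parts := sections.foldl
    (fun parts sec =>
      let parts := parts ++ [('#' :: '#' :: ' ' :: sec.1.toList), []]
      sec.2.foldl
        (fun parts er =>
          let body := normA er.2.toList
          parts ++ [('#' :: '#' :: '#' :: ' ' :: er.1.toList), [],
                    (if body = [] then "_No text extracted._".toList else body), []])
        parts)
    parts
  String.ofList (PySem.Chars.rstrip (PySem.Chars.join ['\n'] parts) ++ ['\n'])

-- ===== PORT B =====
-- port of B's index-scanning paragraph loop: at each position skip a blank line or take the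
-- maximal non-blank run, emit it joined with '\n', and continue past the terminating blank
def parasLoop : List (List Char) → List (List Char)
  | [] => []
  | l :: t =>
    let run := (l :: t).takeWhile (fun x => x ≠ ([] : List Char))
    let rest := (l :: t).dropWhile (fun x => x ≠ ([] : List Char))
    if run = [] then parasLoop (rest.drop 1)
    else PySem.Chars.join ['\n'] run :: parasLoop (rest.drop 1)
  termination_by ls => ls.length
  decreasing_by
  all_goals
    simp only [List.length_drop, List.dropWhile_cons, List.length_cons]
    have h1 := List.length_dropWhile_le (p := fun x => x ≠ ([] : List Char)) (l := t)
    split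
    · omega
    · simp only [List.length_cons]; omega

def normB (text : List Char) : List Char :=
  let lines := (PySem.Chars.splitlines text).map PySem.Chars.rstrip
  PySem.Chars.strip (PySem.Chars.join ['\n', '\n'] (parasLoop lines))

def engineBlock (name raw : String) : List Char :=
  let body := normB raw.toList
  ('#' :: '#' :: '#' :: ' ' :: name.toList) ++ ('\n' :: '\n' ::
    (if body = [] then "_No text extracted._".toList else body))

def markdown_compare_alt (title : String) (sections : List (String × (List (String × String)))) : String :=
  let blocks : List (List Char) :=
    ('#' :: ' ' :: title.toList) ::
      sections.map (fun sec =>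
        PySem.Chars.join ['\n', '\n']
          (('#' :: '#' :: ' ' :: sec.1.toList) :: sec.2.map (fun er => engineBlock er.1 er.2)))
  String.ofList (PySem.Chars.rstrip (PySem.Chars.join ['\n', '\n'] blocks) ++ ['\n'])

-- ===== PRECONDITION & SPEC =====
def Spec_markdown_compare (title : String) (sections : List (String × (List (String × String)))) (out : String) : Prop := out = markdown_compare_alt title sections
instance (title : String) (sections : List (String × (List (String × String)))) (out : String) : Decidable (Spec_markdown_compare title sections out) := by unfold Spec_markdown_compare; infer_instance

-- ===== CLAIM (what is proved, stated in full; the proofs are below) =====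
def Claim_equal_markdown_compare : Prop := ∀ (title : String) (sections : List (String × (List (String × String)))), Dom_markdown_compare title sections → Spec_markdown_compare title sections (markdown_compare title sections)


-- ===== LEMMAS AND PROOFS =====

-- characterisations of strip/rstrip = []
theorem rstrip_eq_nil_iff (l : List Char) :
    PySem.Chars.rstrip l = [] ↔ ∀ c ∈ l, PySem.Chars.isspace c = true := by
  simp [PySem.Chars.rstrip, List.dropWhile_eq_nil_iff]

theorem strip_eq_nil_iff (l : List Char) :
    PySem.Chars.strip l = [] ↔ ∀ c ∈ l, PySem.Chars.isspace c = true := by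
  simp only [PySem.Chars.strip, PySem.Chars.lstrip, rstrip_eq_nil_iff]
  constructor
  · intro h c hc
    have := List.mem_append.mp ((List.takeWhile_append_dropWhile (p := PySem.Chars.isspace) (l := l)).symm ▸ hc)
    rcases this with h1 | h2
    · exact List.mem_takeWhile_imp h1
    · exact h c h2
  · intro h c hc
    exact h c ((List.dropWhile_sublist _).mem hc)

theorem rstrip_idem (l : List Char) :
    PySem.Chars.rstrip (PySem.Chars.rstrip l) = PySem.Chars.rstrip l := by
  simp [PySem.Chars.rstrip, List.dropWhile_idempotent]

theorem strip_rstrip_nil {l : List Char}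
    (h : PySem.Chars.strip (PySem.Chars.rstrip l) = []) : PySem.Chars.rstrip l = [] := by
  have := (strip_eq_nil_iff _).mp h
  calc PySem.Chars.rstrip l = PySem.Chars.rstrip (PySem.Chars.rstrip l) := (rstrip_idem l).symm
    _ = [] := (rstrip_eq_nil_iff _).mpr this

-- functional form of A's prev_blank loop
def goA : Bool → List (List Char) → List (List Char)
  | _, [] => []
  | pb, l :: t =>
    if PySem.Chars.strip l = [] then
      (if pb = false then [[]] else []) ++ goA true t
    else l :: goA false t

theorem foldl_eq_goA (ls : List (List Char)) (out : List (List Char)) (pb : Bool) :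
    (ls.foldl
      (fun (st : List (List Char) × Bool) ln =>
        if PySem.Chars.strip ln = [] then
          (if st.2 = false then st.1 ++ [[]] else st.1, true)
        else
          (st.1 ++ [ln], false))
      (out, pb)).1 = out ++ goA pb ls := by
  induction ls generalizing out pb with
  | nil => simp [goA]
  | cons l t ih =>
    simp only [List.foldl_cons, goA]
    by_cases hb : PySem.Chars.strip l = []
    · cases pb <;> simp [hb, ih]
    · simp [hb, ih]

-- join plumbing
theorem join_cons_ne (s x : List Char) (t : List (List Char)) (ht : t ≠ []) :
    PySem.Chars.join s (x :: t) = x ++ s ++ PySem.Chars.join s t := by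
  cases t with
  | nil => exact absurd rfl ht
  | cons q r => exact PySem.Chars.join_cons_cons s x q r

theorem join_append (s : List Char) (as bs : List (List Char)) (ha : as ≠ []) (hb : bs ≠ []) :
    PySem.Chars.join s (as ++ bs) = PySem.Chars.join s as ++ s ++ PySem.Chars.join s bs := by
  induction as with
  | nil => exact absurd rfl ha
  | cons a t ih =>
    cases t with
    | nil => simpa using join_cons_ne s a bs hb
    | cons b r =>
      rw [List.cons_append, join_cons_ne s a _ (by simp), ih (by simp),
        PySem.Chars.join_cons_cons]
      simp [List.append_assoc]

theorem join_join_cons (s : List Char) (as rest : List (List Char)) (ha : as ≠ []) :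
    PySem.Chars.join s (PySem.Chars.join s as :: rest) = PySem.Chars.join s (as ++ rest) := by
  cases rest with
  | nil => simp [PySem.Chars.join_singleton]
  | cons r t =>
    rw [join_cons_ne s _ _ (by simp), join_append s as (r :: t) ha (by simp)]

theorem join_map_join (s : List Char) {α : Type} (g : α → List (List Char))
    (l : List α) (hg : ∀ y ∈ l, g y ≠ []) (x : List Char) :
    PySem.Chars.join s (x :: l.map (fun y => PySem.Chars.join s (g y)))
      = PySem.Chars.join s (x :: l.flatMap g) := by
  induction l generalizing x with
  | nil => simp
  | cons y t ih =>
    rw [List.map_cons, PySem.Chars.join_cons_cons, ih (fun z hz => hg z (by simp [hz])),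
      join_join_cons s (g y) _ (hg y (by simp)), List.flatMap_cons,
      join_cons_ne s x _ (by have := hg y (by simp); cases hgy : g y with
        | nil => exact absurd hgy this
        | cons a b => simp)]

-- interspersing [] and joining with "\n" is joining with "\n\n" plus a trailing "\n"
theorem join_interleave (ps : List (List Char)) (x : List Char) :
    PySem.Chars.join ['\n'] ((x :: ps).flatMap (fun p => [p, []]))
      = PySem.Chars.join ['\n', '\n'] (x :: ps) ++ ['\n'] := by
  induction ps generalizing x with
  | nil => simp [PySem.Chars.join_cons_cons, PySem.Chars.join_singleton]
  | cons q t ih =>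
    have e1 : ((x :: q :: t).flatMap (fun p => [p, []]))
        = x :: [] :: ((q :: t).flatMap fun p => [p, []]) := by simp
    have e2 : ((q :: t).flatMap fun p => [p, []])
        = q :: ([] :: t.flatMap fun p => [p, []]) := by simp
    rw [e1, e2, PySem.Chars.join_cons_cons, PySem.Chars.join_cons_cons, ← e2, ih q,
      PySem.Chars.join_cons_cons ['\n', '\n'] x q t]
    simp [List.append_assoc]

theorem rstrip_append_newline (y : List Char) :
    PySem.Chars.rstrip (y ++ ['\n']) = PySem.Chars.rstrip y := by
  simp [PySem.Chars.rstrip, show PySem.Chars.isspace '\n' = true from by decide]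

theorem rstrip_append_newlines (y : List Char) (k : Nat) :
    PySem.Chars.rstrip (y ++ List.replicate k '\n') = PySem.Chars.rstrip y := by
  induction k with
  | zero => simp
  | succ n ih =>
    rw [List.replicate_succ', ← List.append_assoc, rstrip_append_newline, ih]

theorem strip_cons_newline (s : List Char) :
    PySem.Chars.strip ('\n' :: s) = PySem.Chars.strip s := by
  simp [PySem.Chars.strip, PySem.Chars.lstrip,
    show PySem.Chars.isspace '\n' = true from by decide]

theorem strip_append_newlines (s : List Char) (k : Nat) :
    PySem.Chars.strip (s ++ List.replicate k '\n') = PySem.Chars.strip s := by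
  simp only [PySem.Chars.strip, PySem.Chars.lstrip, List.dropWhile_append]
  by_cases h : (List.dropWhile PySem.Chars.isspace s).isEmpty
  · simp only [h, if_true]
    have : List.dropWhile PySem.Chars.isspace (List.replicate k '\n') = [] := by
      rw [List.dropWhile_eq_nil_iff]
      intro c hc
      have := List.eq_of_mem_replicate hc
      subst this; decide
    rw [this, List.isEmpty_iff.mp h]
  · simp only [h, if_false]
    exact rstrip_append_newlines _ _


-- equation lemmas for parasLoop
theorem parasLoop_cons_nil (t : List (List Char)) : parasLoop (([] : List Char) :: t) = parasLoop t := by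
  rw [parasLoop]
  simp

theorem parasLoop_cons_ne (l : List Char) (t : List (List Char)) (hl : l ≠ []) :
    parasLoop (l :: t)
      = PySem.Chars.join ['\n'] (l :: t.takeWhile (fun x => x ≠ ([] : List Char)))
        :: parasLoop ((t.dropWhile (fun x => x ≠ ([] : List Char))).drop 1) := by
  rw [parasLoop]
  simp [List.takeWhile_cons, List.dropWhile_cons, hl]

theorem strip_nil_char : PySem.Chars.strip ([] : List Char) = [] := by decide

-- all-blank characterisation, used to align the endings of the two loops
-- (H says the lines are already right-stripped: a line whose strip is empty IS empty)
theorem goA_nil_iff_parasLoop_nil (t : List (List Char))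
    (H : ∀ l ∈ t, PySem.Chars.strip l = [] → l = []) :
    (goA true t = [] ↔ parasLoop t = []) := by
  induction t with
  | nil => simp [goA, parasLoop]
  | cons l t ih =>
    by_cases hl : l = []
    · subst hl
      rw [parasLoop_cons_nil]
      simp only [goA, strip_nil_char, if_true, List.nil_append]
      exact ih (fun x hx => H x (by simp [hx]))
    · have hs : ¬ PySem.Chars.strip l = [] := fun h => hl (H l (by simp) h)
      rw [parasLoop_cons_ne l t hl]
      simp [goA, hs]

-- A's loop on a maximal non-blank run
theorem goA_false_run (t : List (List Char))
    (H : ∀ l ∈ t, PySem.Chars.strip l = [] → l = []) :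
    goA false t = t.takeWhile (fun x => x ≠ ([] : List Char)) ++
      (match t.dropWhile (fun x => x ≠ ([] : List Char)) with
        | [] => []
        | _ :: t' => ([] : List Char) :: goA true t') := by
  induction t with
  | nil => simp [goA]
  | cons l t ih =>
    by_cases hl : l = []
    · subst hl
      simp [goA, strip_nil_char, List.takeWhile_cons, List.dropWhile_cons]
    · have hs : ¬ PySem.Chars.strip l = [] := fun h => hl (H l (by simp) h)
      simp only [goA, hs, if_false, List.takeWhile_cons, List.dropWhile_cons]
      simp only [hl, if_true, ite_not, decide_not]
      rw [ih (fun x hx => H x (by simp [hx]))]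
      simp [hl]

-- the main correspondence: A's collapsed lines joined with "\n" are B's paragraphs joined
-- with "\n\n", up to trailing newlines that the final strip removes
theorem goA_parasLoop (n : Nat) (ls : List (List Char)) (hn : ls.length ≤ n)
    (H : ∀ l ∈ ls, PySem.Chars.strip l = [] → l = []) :
    ∃ k, PySem.Chars.join ['\n'] (goA true ls)
      = PySem.Chars.join ['\n', '\n'] (parasLoop ls) ++ List.replicate k '\n' := by
  induction n generalizing ls with
  | zero =>
    have : ls = [] := List.eq_nil_of_length_eq_zero (Nat.le_zero.mp hn)
    subst this; exact ⟨0, by simp [goA, parasLoop]⟩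
  | succ n ih =>
    cases ls with
    | nil => exact ⟨0, by simp [goA, parasLoop]⟩
    | cons l t =>
      by_cases hl : l = []
      · subst hl
        rw [parasLoop_cons_nil]
        simp only [goA, strip_nil_char, if_true, List.nil_append]
        exact ih t (by simp only [List.length_cons] at hn; omega)
          (fun x hx => H x (by simp [hx]))
      · have hs : ¬ PySem.Chars.strip l = [] := fun h => hl (H l (by simp) h)
        have hgo : goA true (l :: t) = l :: goA false t := by simp [goA, hs]
        have hgof := goA_false_run t (fun x hx => H x (by simp [hx]))
        have hlenrest := List.length_dropWhile_le (p := fun x => x ≠ ([] : List Char)) (l := t)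
        rw [parasLoop_cons_ne l t hl]
        cases hdw : t.dropWhile (fun x => x ≠ ([] : List Char)) with
        | nil =>
          -- no blank terminator: one run, nothing after
          have htw : t.takeWhile (fun x => x ≠ ([] : List Char)) = t := by
            have := List.takeWhile_append_dropWhile (p := fun x => x ≠ ([] : List Char)) (l := t)
            rw [hdw, List.append_nil] at this; exact this
          have hgof2 : goA false t = t := by
            rw [hgof, hdw, htw]
            show t ++ ([] : List (List Char)) = t
            simp
          refine ⟨0, ?_⟩
          rw [hgo, hgof2, htw]
          simp [PySem.Chars.join_singleton, parasLoop]
        | cons y t' =>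
          have hlent' : t'.length ≤ n := by
            have h2 : (y :: t').length ≤ t.length := hdw ▸ hlenrest
            simp only [List.length_cons] at h2 hn
            omega
          have Ht' : ∀ x ∈ t', PySem.Chars.strip x = [] → x = [] := by
            intro x hx
            have hsub : List.Sublist t' t := (List.sublist_cons_self y t').trans
              (hdw ▸ List.dropWhile_sublist _)
            exact H x (by simp [hsub.mem hx])
          obtain ⟨k, hk⟩ := ih t' hlent' Ht'
          have hrunne : (l :: t.takeWhile (fun x => x ≠ ([] : List Char))) ≠ [] := by simp
          simp only [List.drop_succ_cons, List.drop_zero]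
          have hgof2 : goA false t = t.takeWhile (fun x => x ≠ ([] : List Char)) ++
              (([] : List Char) :: goA true t') := by
            rw [hgof, hdw]
          by_cases hg : goA true t' = []
          · -- trailing blank run only: A leaves a trailing "", B stops
            have hp : parasLoop t' = [] := (goA_nil_iff_parasLoop_nil t' Ht').mp hg
            refine ⟨1, ?_⟩
            rw [hgo, hgof2, hg, hp]
            rw [show l :: (t.takeWhile (fun x => x ≠ ([] : List Char)) ++ [([] : List Char)])
                = (l :: t.takeWhile (fun x => x ≠ ([] : List Char))) ++ [([] : List Char)] from
                by simp]
            rw [join_append _ _ _ hrunne (by simp)]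
            simp [PySem.Chars.join_singleton]
          · have hp : parasLoop t' ≠ [] :=
              fun h => hg ((goA_nil_iff_parasLoop_nil t' Ht').mpr h)
            refine ⟨k, ?_⟩
            rw [hgo, hgof2]
            rw [show l :: (t.takeWhile (fun x => x ≠ ([] : List Char)) ++
                  (([] : List Char) :: goA true t'))
                = (l :: t.takeWhile (fun x => x ≠ ([] : List Char))) ++
                  (([] : List Char) :: goA true t') from by simp]
            rw [join_append _ _ _ hrunne (by simp)]
            rw [join_cons_ne _ _ _ hg, hk]
            rw [join_cons_ne _ _ _ hp]
            simp [List.append_assoc]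

-- the rstripped split lines satisfy the H hypothesis
theorem H_rstripped (text : List Char) :
    ∀ l ∈ (PySem.Chars.splitlines text).map PySem.Chars.rstrip,
      PySem.Chars.strip l = [] → l = [] := by
  intro l hl hs
  simp only [List.mem_map] at hl
  obtain ⟨x, -, rfl⟩ := hl
  exact strip_rstrip_nil hs

theorem strip_goA_false (ls : List (List Char))
    (H : ∀ l ∈ ls, PySem.Chars.strip l = [] → l = []) :
    PySem.Chars.strip (PySem.Chars.join ['\n'] (goA false ls))
      = PySem.Chars.strip (PySem.Chars.join ['\n', '\n'] (parasLoop ls)) := by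
  obtain ⟨k, hk⟩ := goA_parasLoop ls.length ls le_rfl H
  cases ls with
  | nil => simp [goA, parasLoop]
  | cons l t =>
    by_cases hb : PySem.Chars.strip l = []
    · -- leading blank: A's loop emits one "" that the outer strip removes again
      have hl : l = [] := H l (by simp) hb
      subst hl
      have hfalse : goA false (([] : List Char) :: t)
          = ([] : List Char) :: goA true t := by
        simp [goA, strip_nil_char]
      have htrue : goA true (([] : List Char) :: t) = goA true t := by
        simp [goA, strip_nil_char]
      rw [hfalse, parasLoop_cons_nil]
      rw [htrue, parasLoop_cons_nil] at hk
      cases hg : goA true t with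
      | nil =>
        rw [hg] at hk
        have hz := (List.append_eq_nil_iff.mp hk.symm).1
        rw [PySem.Chars.join_singleton, hz]
      | cons g gs =>
        rw [← hg, join_cons_ne _ _ _ (by simp [hg]), List.nil_append]
        rw [show (['\n'] ++ PySem.Chars.join ['\n'] (goA true t))
            = '\n' :: PySem.Chars.join ['\n'] (goA true t) from rfl]
        rw [strip_cons_newline, hk, strip_append_newlines]
    · have hfalse : goA false (l :: t) = goA true (l :: t) := by
        simp [goA, hb]
      rw [hfalse, hk, strip_append_newlines]

theorem norm_eq (text : List Char) : normA text = normB text := by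
  simp only [normA, normB]
  rw [foldl_eq_goA, List.nil_append]
  exact strip_goA_false _ (H_rstripped text)

-- proof-only abbreviations: the flat list of pieces both programs join
def pcHead (t : String) : List Char := '#' :: ' ' :: t.toList
def pcSec (f : String) : List Char := '#' :: '#' :: ' ' :: f.toList
def pcBody (raw : String) : List Char :=
  if normB raw.toList = [] then "_No text extracted._".toList else normB raw.toList
def enPieces (er : String × String) : List (List Char) :=
  ['#' :: '#' :: '#' :: ' ' :: er.1.toList, pcBody er.2]
def pcs (title : String) (sections : List (String × (List (String × String)))) :
    List (List Char) :=
  pcHead title :: sections.flatMap (fun sec => pcSec sec.1 :: sec.2.flatMap enPieces)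

theorem A_eq (title : String) (sections : List (String × (List (String × String)))) :
    markdown_compare title sections
      = String.ofList (PySem.Chars.rstrip
          (PySem.Chars.join ['\n', '\n'] (pcs title sections)) ++ ['\n']) := by
  simp only [markdown_compare, norm_eq, PySem.List.foldl_append_eq_flatMap, List.append_assoc]
  have hbig : (['#' :: ' ' :: title.toList, ([] : List Char)] ++
      sections.flatMap (fun x => ['#' :: '#' :: ' ' :: x.1.toList, ([] : List Char)] ++
        x.2.flatMap (fun er => [('#' :: '#' :: '#' :: ' ' :: er.1.toList), [],
          (if normB er.2.toList = [] then "_No text extracted._".toList else normB er.2.toList), []])))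
      = (pcs title sections).flatMap (fun p => [p, []]) := by
    simp [pcs, pcHead, pcSec, enPieces, pcBody, List.flatMap_assoc]
  rw [hbig, show pcs title sections = pcHead title ::
      (sections.flatMap fun sec => pcSec sec.1 :: sec.2.flatMap enPieces) from rfl,
    join_interleave, rstrip_append_newline]

theorem engineBlock_eq (er : String × String) :
    engineBlock er.1 er.2 = PySem.Chars.join ['\n', '\n'] (enPieces er) := by
  simp [engineBlock, enPieces, pcBody, PySem.Chars.join_cons_cons, PySem.Chars.join_singleton]

theorem B_eq (title : String) (sections : List (String × (List (String × String)))) :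
    markdown_compare_alt title sections
      = String.ofList (PySem.Chars.rstrip
          (PySem.Chars.join ['\n', '\n'] (pcs title sections)) ++ ['\n']) := by
  simp only [markdown_compare_alt]
  have h1 : ∀ sec : String × (List (String × String)),
      PySem.Chars.join ['\n', '\n'] (('#' :: '#' :: ' ' :: sec.1.toList) ::
        sec.2.map (fun er => engineBlock er.1 er.2))
      = PySem.Chars.join ['\n', '\n'] (pcSec sec.1 :: sec.2.flatMap enPieces) := by
    intro sec
    have : (fun er : String × String => engineBlock er.1 er.2)
        = fun er => PySem.Chars.join ['\n', '\n'] (enPieces er) := funext engineBlock_eq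
    rw [this, join_map_join _ enPieces sec.2 (fun y _ => by simp [enPieces]) _]
    rfl
  simp only [h1]
  rw [join_map_join _ (fun sec => pcSec sec.1 :: sec.2.flatMap enPieces) sections
      (fun y _ => by simp) ('#' :: ' ' :: title.toList)]
  rfl

-- ===== VERDICT (by name: the statement is the Claim_ definition above) =====
theorem markdown_compare_spec : Claim_equal_markdown_compare := by
  intro title sections _
  unfold Spec_markdown_compare
  rw [A_eq, B_eq]
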